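-- pv_equiv track=rewrite | github.com/AmiltonCabral/programacao-1 | Unidade 08/force-sort/solucao.py | force_sort
-- ===== SOURCE A (Python) =====
-- def force_sort(seq):
--     if len(seq) > 0:
--         resultado = [0]
--     else:
--         resultado = []
--     for i in range(1, len(seq)):
--         if seq[i] < seq[i-1]:
--             resultado.append(seq[i-1] - seq[i])
--             seq[i] = seq[i-1]
--         else:
--             resultado.append(0)
--     return resultado
-- ===== SOURCE B (Python) =====
-- def force_sort(seq):
--     # Two-pass decomposition: prefix running maximum first, then the increments
--     # as elementwise differences; same in-place mutation of seq as the original.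
--     if len(seq) == 0:
--         return []
--     maxes = []
--     m = seq[0]
--     for s in seq:
--         if s > m:
--             m = s
--         maxes.append(m)
--     result = [m - s for m, s in zip(maxes, seq)]
--     for i, m in enumerate(maxes):
--         if seq[i] < m:
--             seq[i] = m
--     return result
-- ===== Notes on version B (the rewrite author's own statement) =====
-- stated objective: alternative
-- what changed: Replaces the single index loop that mutates seq[i] and reads seq[i-1] back from the mutated list with a two-pass decomposition: compute the prefix running maximum, then obtain each increment as runningmax - element via zip; the mutation is replayed separately.
import Mathlib
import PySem

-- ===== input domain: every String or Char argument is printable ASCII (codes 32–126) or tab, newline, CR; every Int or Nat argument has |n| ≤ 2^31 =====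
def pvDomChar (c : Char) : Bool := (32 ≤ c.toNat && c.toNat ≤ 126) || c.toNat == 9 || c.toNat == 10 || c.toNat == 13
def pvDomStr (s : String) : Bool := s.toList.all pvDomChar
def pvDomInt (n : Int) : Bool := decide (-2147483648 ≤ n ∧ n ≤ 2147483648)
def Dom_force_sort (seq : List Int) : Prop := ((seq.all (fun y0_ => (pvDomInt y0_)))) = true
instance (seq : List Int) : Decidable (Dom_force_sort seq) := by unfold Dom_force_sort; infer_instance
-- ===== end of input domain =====

-- B replaces A's single mutating index loop by a two-pass decomposition
-- (prefix running maximum, then elementwise differences); return values proved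
-- equal — both Pythons also mutate seq identically in place (side effect not
-- modelled here).

-- ===== PORT A =====
-- literal port of A: index loop over range(1, len(seq)), reading and writing
-- the (mutated) sequence; indices are always in range, so the total getters
-- pyGetD/pySetD are exact here.
def force_sort (seq : List Int) : List Int :=
  let resultado : List Int := if seq.length > 0 then [0] else []
  let final :=
    (PySem.List.pyRange 1 (seq.length : Int) 1).foldl
      (fun (st : List Int × List Int) (i : Int) =>
        let s := st.1
        let r := st.2
        if PySem.List.pyGetD s i 0 < PySem.List.pyGetD s (i - 1) 0 then
          (PySem.List.pySetD s i (PySem.List.pyGetD s (i - 1) 0),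
           r ++ [PySem.List.pyGetD s (i - 1) 0 - PySem.List.pyGetD s i 0])
        else
          (s, r ++ [0]))
      (seq, resultado)
  final.2

-- ===== PORT B =====
-- literal port of Source B's return value: one fold building the running-maximum
-- list, then zipped elementwise differences (Source B's mutation replay only touches
-- seq, not the return value).
def force_sort_alt (seq : List Int) : List Int :=
  match seq with
  | [] => []
  | x :: _ =>
    let maxes :=
      (seq.foldl
        (fun (st : Int × List Int) (s : Int) =>
          let m := if s > st.1 then s else st.1
          (m, st.2 ++ [m]))
        (x, ([] : List Int))).2
    List.zipWith (fun m s => m - s) maxes seq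

-- ===== PRECONDITION & SPEC =====
def Spec_force_sort (seq : List Int) (out : List Int) : Prop := out = force_sort_alt seq
instance (seq : List Int) (out : List Int) : Decidable (Spec_force_sort seq out) := by unfold Spec_force_sort; infer_instance

-- ===== CLAIM (what is proved, stated in full; the proofs are below) =====
def Claim_equal_force_sort : Prop := ∀ (seq : List Int), Dom_force_sort seq → Spec_force_sort seq (force_sort seq)

-- ===== LEMMAS AND PROOFS =====

-- running-maximum list with carry m
def mutL (m : Int) : List Int → List Int
  | [] => []
  | y :: ys => (max m y) :: mutL (max m y) ys

-- the increments with carry m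
def goL (m : Int) : List Int → List Int
  | [] => []
  | y :: ys => (max m y - y) :: goL (max m y) ys

lemma fB_snd (l : List Int) : ∀ (m : Int) (acc : List Int),
    (l.foldl (fun (st : Int × List Int) (s : Int) =>
        let m := if s > st.1 then s else st.1
        (m, st.2 ++ [m])) (m, acc)).2 = acc ++ mutL m l := by
  induction l with
  | nil => intro m acc; simp [mutL]
  | cons y ys ih =>
    intro m acc
    simp only [List.foldl_cons]
    have hm : (if y > m then y else m) = max m y := by
      split_ifs with h <;> omega
    simp only [hm, ih, mutL]
    simp

lemma zip_mutL (l : List Int) : ∀ m : Int,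
    List.zipWith (fun a b => a - b) (mutL m l) l = goL m l := by
  induction l with
  | nil => intro m; simp [mutL, goL]
  | cons y ys ih => intro m; simp [mutL, goL, ih]

lemma alt_eq (x : Int) (xs : List Int) :
    force_sort_alt (x :: xs) = 0 :: goL x xs := by
  simp only [force_sort_alt]
  rw [fB_snd, List.nil_append, zip_mutL (x :: xs) x]
  simp [goL]

-- A's loop invariant: the processed prefix is pre ++ [m], with m its running maximum
lemma A_loop (ys : List Int) : ∀ (pre : List Int) (m : Int) (r : List Int),
    (PySem.List.pyRange ((pre.length : Int) + 1) ((pre.length : Int) + 1 + (ys.length : Int)) 1).foldl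
      (fun (st : List Int × List Int) (i : Int) =>
        let s := st.1
        let r := st.2
        if PySem.List.pyGetD s i 0 < PySem.List.pyGetD s (i - 1) 0 then
          (PySem.List.pySetD s i (PySem.List.pyGetD s (i - 1) 0),
           r ++ [PySem.List.pyGetD s (i - 1) 0 - PySem.List.pyGetD s i 0])
        else
          (s, r ++ [0]))
      (pre ++ m :: ys, r)
    = (pre ++ m :: mutL m ys, r ++ goL m ys) := by
  induction ys with
  | nil =>
    intro pre m r
    rw [PySem.List.pyRange_one_eq_nil (by push_cast [List.length_nil]; omega)]
    simp [mutL, goL]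
  | cons y ys ih =>
    intro pre m r
    rw [PySem.List.pyRange_one_cons (by push_cast [List.length_cons]; omega)]
    simp only [List.foldl_cons]
    have hget1 : PySem.List.pyGetD (pre ++ m :: y :: ys) ((pre.length : Int) + 1) 0 = y := by
      rw [show (pre.length : Int) + 1 = ((pre.length + 1 : Nat) : Int) by push_cast; ring,
          PySem.List.pyGetD_natCast]
      simp [List.getD_eq_getElem?_getD]
    have hget0 : PySem.List.pyGetD (pre ++ m :: y :: ys) ((pre.length : Int) + 1 - 1) 0 = m := by
      rw [show (pre.length : Int) + 1 - 1 = ((pre.length : Nat) : Int) by ring,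
          PySem.List.pyGetD_natCast]
      simp [List.getD_eq_getElem?_getD]
    have hset : PySem.List.pySetD (pre ++ m :: y :: ys) ((pre.length : Int) + 1) m
        = pre ++ m :: m :: ys := by
      rw [show (pre.length : Int) + 1 = ((pre.length + 1 : Nat) : Int) by push_cast; ring,
          PySem.List.pySetD_natCast, List.set_append_right _ _ (by omega)]
      simp
    by_cases hc : y < m
    · simp only [hget1, hget0, hset, if_pos hc]
      have hmax : max m y = m := by omega
      have key := ih (pre ++ [m]) m (r ++ [m - y])
      rw [show pre ++ [m] ++ m :: ys = pre ++ m :: m :: ys by simp,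
          show pre ++ [m] ++ m :: mutL m ys = pre ++ m :: m :: mutL m ys by simp] at key
      have hb1 : (((pre ++ [m]).length : Nat) : Int) + 1 = (pre.length : Int) + 1 + 1 := by
        push_cast [List.length_append, List.length_cons, List.length_nil]; ring
      have hb2 : (((pre ++ [m]).length : Nat) : Int) + 1 + ((ys.length : Nat) : Int)
          = (pre.length : Int) + 1 + (((y :: ys).length : Nat) : Int) := by
        push_cast [List.length_append, List.length_cons, List.length_nil]; ring
      rw [hb2, hb1] at key
      rw [show (mutL m (y :: ys)) = m :: mutL m ys by simp [mutL, hmax],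
          show (goL m (y :: ys)) = (m - y) :: goL m ys by simp [goL, hmax],
          show r ++ (m - y) :: goL m ys = (r ++ [m - y]) ++ goL m ys by simp]
      exact key
    · simp only [hget1, hget0, if_neg hc]
      have hmax : max m y = y := by omega
      have key := ih (pre ++ [m]) y (r ++ [0])
      rw [show pre ++ [m] ++ y :: ys = pre ++ m :: y :: ys by simp,
          show pre ++ [m] ++ y :: mutL y ys = pre ++ m :: y :: mutL y ys by simp] at key
      have hb1 : (((pre ++ [m]).length : Nat) : Int) + 1 = (pre.length : Int) + 1 + 1 := by
        push_cast [List.length_append, List.length_cons, List.length_nil]; ring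
      have hb2 : (((pre ++ [m]).length : Nat) : Int) + 1 + ((ys.length : Nat) : Int)
          = (pre.length : Int) + 1 + (((y :: ys).length : Nat) : Int) := by
        push_cast [List.length_append, List.length_cons, List.length_nil]; ring
      rw [hb2, hb1] at key
      rw [show (mutL m (y :: ys)) = y :: mutL y ys by simp [mutL, hmax],
          show (goL m (y :: ys)) = 0 :: goL y ys by simp [goL, hmax],
          show r ++ (0 : Int) :: goL y ys = (r ++ [0]) ++ goL y ys by simp]
      exact key

-- ===== VERDICT (by name: the statement is the Claim_ definition above) =====
theorem force_sort_spec : Claim_equal_force_sort := by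
  intro seq _
  unfold Spec_force_sort
  cases seq with
  | nil => rfl
  | cons x xs =>
    rw [alt_eq]
    simp only [force_sort]
    have key := A_loop xs [] x [0]
    simp only [List.length_nil, Nat.cast_zero, zero_add, List.nil_append] at key
    rw [show ((x :: xs).length : Int) = 1 + (xs.length : Int) by
          push_cast [List.length_cons]; ring]
    simp only [List.length_cons, gt_iff_lt, Nat.succ_pos, if_pos]
    rw [key]; rfl
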